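-- pv_equiv track=rewrite | github.com/sridattayalla/Programming | Competitions/Codevita/Codevita2k18/Game of Jumps.py | max_total
-- ===== SOURCE A (Python) =====
-- def max_total(selected, totals):
--     max_val = 0
--     if(len(totals) == 0):
--         max_val = 0
--     else:
--         for i in range(len(totals)):
--             temp = totals[i][0]
--             temp_val = totals[i][1]
--
--             if(not any([x in selected for x in temp])):
--                 if max_val < temp_val + max_total(selected+temp, totals[i+1:]):
--                     max_val = temp_val + max_total(selected+temp, totals[i+1:])
--
--
--     return max_val
-- ===== SOURCE B (Python) =====
-- def max_total(selected, totals):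
--     # Take-or-skip structural recursion over the group list: each recursive
--     # result is computed once (A recomputes it twice, and restarts a scan over
--     # every remaining index), and membership tests use a set.
--     def go(sel, groups):
--         if not groups:
--             return 0
--         (group, val), rest = groups[0], groups[1:]
--         skip = go(sel, rest)
--         if any(x in sel for x in group):
--             return skip
--         return max(skip, val + go(sel | set(group), rest))
--     return go(set(selected), totals)
-- ===== Notes on version B (the rewrite author's own statement) =====
-- stated objective: faster
-- what changed: Replaces A's scan-over-all-remaining-indices recursion (which also evaluates each recursive call twice, once in the comparison and once in the assignment) with a binary take-or-skip structural recursion that computes each recursive result exactly once and tests membership against a set instead of a list.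
import Mathlib
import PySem

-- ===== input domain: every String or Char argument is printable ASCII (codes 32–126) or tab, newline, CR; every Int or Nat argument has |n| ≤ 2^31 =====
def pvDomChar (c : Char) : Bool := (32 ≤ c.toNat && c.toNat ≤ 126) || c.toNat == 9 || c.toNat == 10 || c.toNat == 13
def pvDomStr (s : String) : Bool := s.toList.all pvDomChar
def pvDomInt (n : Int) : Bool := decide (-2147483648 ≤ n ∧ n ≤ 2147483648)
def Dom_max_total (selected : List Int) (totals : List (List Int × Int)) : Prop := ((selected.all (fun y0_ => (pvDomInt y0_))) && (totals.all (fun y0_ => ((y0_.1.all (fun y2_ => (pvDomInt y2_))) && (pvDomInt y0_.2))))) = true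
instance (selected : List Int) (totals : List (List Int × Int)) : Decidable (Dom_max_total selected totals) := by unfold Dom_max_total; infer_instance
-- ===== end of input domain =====

-- B replaces A's restart-the-whole-scan recursion (which also computes every recursive call
-- twice) with a take-or-skip recursion computing each recursive result once, with set membership.

-- ===== PORT A =====
-- A's `for i in range(len(totals))` walks suffixes: totals[i] is the head and
-- totals[i+1:] the tail of the current suffix, so the loop is transcribed as a
-- recursion over suffixes carrying the accumulator max_val; the recursive call
-- appears twice, exactly as in the Python.
mutual
def max_total (selected : List Int) (totals : List (List Int × Int)) : Int :=
  if totals.length = 0 then 0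
  else maxTotalLoop selected totals 0
termination_by 2 * totals.length + 1

def maxTotalLoop (selected : List Int) (rest : List (List Int × Int)) (max_val : Int) : Int :=
  match rest with
  | [] => max_val
  | (temp, temp_val) :: rest' =>
      let max_val :=
        if ¬ (temp.any (fun x => selected.contains x)) then
          if max_val < temp_val + max_total (selected ++ temp) rest' then
            temp_val + max_total (selected ++ temp) rest'
          else max_val
        else max_val
      maxTotalLoop selected rest' max_val
termination_by 2 * rest.length
end

-- ===== PORT B =====
def max_total_altGo (sel : PySem.Set Int) (groups : List (List Int × Int)) : Int :=
  match groups with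
  | [] => 0
  | (group, val) :: rest =>
      let skip := max_total_altGo sel rest
      if group.any (fun x => PySem.Set.contains sel x) then skip
      else max skip (val + max_total_altGo (PySem.Set.union sel group) rest)

def max_total_alt (selected : List Int) (totals : List (List Int × Int)) : Int :=
  max_total_altGo (PySem.Set.ofList selected) totals

-- ===== PRECONDITION & SPEC =====
def Spec_max_total (selected : List Int) (totals : List (List Int × Int)) (out : Int) : Prop := out = max_total_alt selected totals
instance (selected : List Int) (totals : List (List Int × Int)) (out : Int) : Decidable (Spec_max_total selected totals out) := by unfold Spec_max_total; infer_instance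

-- ===== CLAIM (what is proved, stated in full; the proofs are below) =====
def Claim_equal_max_total : Prop := ∀ (selected : List Int) (totals : List (List Int × Int)), Dom_max_total selected totals → Spec_max_total selected totals (max_total selected totals)

-- ===== LEMMAS AND PROOFS =====

-- the accumulator never decreases
theorem maxTotalLoop_ge (rest : List (List Int × Int)) (selected : List Int) :
    ∀ m : Int, m ≤ maxTotalLoop selected rest m := by
  induction rest with
  | nil => intro m; simp [maxTotalLoop]
  | cons hd rest' ih =>
      intro m
      obtain ⟨temp, temp_val⟩ := hd
      rw [maxTotalLoop]
      refine le_trans ?_ (ih _)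
      split_ifs <;> omega

-- pulling the accumulator out of the loop
theorem maxTotalLoop_max (rest : List (List Int × Int)) (selected : List Int) :
    ∀ m : Int, 0 ≤ m → maxTotalLoop selected rest m = max m (maxTotalLoop selected rest 0) := by
  induction rest with
  | nil => intro m hm; simp only [maxTotalLoop]; omega
  | cons hd rest' ih =>
      intro m hm
      obtain ⟨temp, temp_val⟩ := hd
      rw [maxTotalLoop, maxTotalLoop]
      set t := temp_val + max_total (selected ++ temp) rest' with ht
      by_cases hc : ¬ (temp.any (fun x => selected.contains x))
      · simp only [if_pos hc]
        rw [ih (if m < t then t else m) (by split_ifs <;> omega),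
            ih (if (0:Int) < t then t else 0) (by split_ifs <;> omega)]
        split_ifs <;> omega
      · simp only [if_neg hc]
        rw [ih m hm, ih 0 le_rfl]

theorem max_total_eq_loop (selected : List Int) (totals : List (List Int × Int)) :
    max_total selected totals = maxTotalLoop selected totals 0 := by
  cases totals with
  | nil => rw [max_total]; simp [maxTotalLoop]
  | cons hd tl => rw [max_total]; simp

theorem max_total_nonneg (selected : List Int) (totals : List (List Int × Int)) :
    0 ≤ max_total selected totals := by
  rw [max_total_eq_loop]; exact maxTotalLoop_ge _ _ 0

-- membership test agrees when the set has the same members as the list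
theorem any_contains_congr (temp : List Int) (selected : List Int) (s : PySem.Set Int)
    (h : ∀ x, x ∈ s ↔ x ∈ selected) :
    (temp.any (fun x => PySem.Set.contains s x)) = (temp.any (fun x => selected.contains x)) := by
  simp only [List.any_eq, decide_eq_decide]
  constructor <;> rintro ⟨x, hx, hx2⟩ <;> exact ⟨x, hx, by
    simp only [PySem.Set.contains_iff, List.contains_iff_mem, h] at hx2 ⊢; exact hx2⟩

-- the main induction: A on a member-list equals B's go on any set with the same members
theorem key (totals : List (List Int × Int)) :
    ∀ (selected : List Int) (s : PySem.Set Int), (∀ x, x ∈ s ↔ x ∈ selected) →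
      max_total selected totals = max_total_altGo s totals := by
  induction totals with
  | nil => intro sel s _; rw [max_total]; simp [max_total_altGo]
  | cons hd rest ih =>
      intro sel s h
      obtain ⟨temp, temp_val⟩ := hd
      rw [max_total_eq_loop, maxTotalLoop,
          maxTotalLoop_max rest sel _ (by split_ifs <;> omega),
          ← max_total_eq_loop, max_total_altGo]
      have hmem : temp.any (fun x => PySem.Set.contains s x)
                = temp.any (fun x => sel.contains x) := any_contains_congr temp sel s h
      have ih1 : max_total sel rest = max_total_altGo s rest := ih sel s h
      have ih2 : max_total (sel ++ temp) rest
               = max_total_altGo (PySem.Set.union s temp) rest := by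
        refine ih _ _ (fun x => ?_)
        rw [PySem.Set.mem_union, List.mem_append, h]
      have hnn : 0 ≤ max_total sel rest := max_total_nonneg sel rest
      by_cases hc : (temp.any (fun x => sel.contains x)) = true
      · rw [if_neg (not_not_intro hc), hmem, if_pos hc, ← ih1]
        omega
      · rw [if_pos hc, hmem, if_neg hc, ih1, ← ih2, ← ih1]
        split_ifs <;> omega

-- ===== VERDICT (by name: the statement is the Claim_ definition above) =====
theorem max_total_spec : Claim_equal_max_total := by
  intro selected totals _
  unfold Spec_max_total max_total_alt
  exact key totals selected (PySem.Set.ofList selected)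
    (fun x => by rw [PySem.Set.mem_ofList])
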